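-- pv_equiv track=rewrite | github.com/Patxi91/CodeWars_Cloud | 7kyu-Esthetic Numbers-Patxi.py | is_esthetic
-- ===== SOURCE A (Python) =====
-- def is_esthetic(number, base):
--     digits = []
--     while number > 0:
--         digits.append(number % base)
--         number //= base
--     digits.reverse()
--
--     for i in range(1, len(digits)):
--         if abs(digits[i] - digits[i-1]) != 1:
--             return False
--     return True
-- ===== SOURCE B (Python) =====
-- def is_esthetic(number, base):
--     prev = None
--     while number > 0:
--         cur = number % base
--         if prev is not None and abs(cur - prev) != 1:
--             return False
--         prev = cur
--         number //= base
--     return True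
-- ===== Notes on version B (the rewrite author's own statement) =====
-- stated objective: simpler
-- what changed: fuses digit extraction and the adjacency check into a single pass that keeps only the previous digit, instead of building a digits list, reversing it and re-scanning it by index
import Mathlib
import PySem

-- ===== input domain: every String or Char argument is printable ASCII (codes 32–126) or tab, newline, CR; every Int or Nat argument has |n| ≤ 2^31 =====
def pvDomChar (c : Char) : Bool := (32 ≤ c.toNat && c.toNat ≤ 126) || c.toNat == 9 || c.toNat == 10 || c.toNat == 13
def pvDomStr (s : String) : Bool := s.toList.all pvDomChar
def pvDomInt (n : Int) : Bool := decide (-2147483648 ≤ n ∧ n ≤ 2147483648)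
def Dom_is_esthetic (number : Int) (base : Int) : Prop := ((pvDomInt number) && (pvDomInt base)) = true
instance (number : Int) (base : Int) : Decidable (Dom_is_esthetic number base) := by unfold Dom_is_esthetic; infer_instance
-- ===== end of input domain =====

-- B fuses digit extraction and the adjacency check into one pass keeping only the
-- previous digit, instead of building a digits list, reversing and index-scanning it (simpler).

-- ===== PORT A =====
-- the while-loop of A: digits collected in append order (least-significant first);
-- fuel number.toNat+1 suffices whenever the Python loop terminates (Pre_), and the
-- truncation on fuel exhaustion only happens outside Pre_
def digitsA : Nat → Int → Int → List Int
  | 0, _, _ => []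
  | f + 1, n, b =>
    if n > 0 then PySem.Int.mod n b :: digitsA f (PySem.Int.floordiv n b) b else []

-- the for-loop of A over range(1, len(digits)); digits[i] is in range for these i, so getD is exact
def checkFrom (digits : List Int) (i : Nat) : Bool :=
  if i < digits.length then
    if ((digits.getD i 0) - (digits.getD (i - 1) 0)).natAbs ≠ 1 then false
    else checkFrom digits (i + 1)
  else true
termination_by digits.length - i

def is_esthetic (number : Int) (base : Int) : Bool :=
  let digits := (digitsA (number.toNat + 1) number base).reverse
  checkFrom digits 1

-- ===== PORT B =====
-- B's fused while loop: prev is the previously extracted digit (None before the first)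
def altLoop : Nat → Int → Int → Option Int → Bool
  | 0, _, _, _ => true
  | f + 1, n, b, prev =>
    if n > 0 then
      let cur := PySem.Int.mod n b
      match prev with
      | some p =>
        if (cur - p).natAbs ≠ 1 then false
        else altLoop f (PySem.Int.floordiv n b) b (some cur)
      | none => altLoop f (PySem.Int.floordiv n b) b (some cur)
    else true

def is_esthetic_alt (number : Int) (base : Int) : Bool :=
  altLoop (number.toNat + 1) number base none

-- ===== PRECONDITION & SPEC =====
-- Pre_ excludes exactly the inputs where Python A returns no value: base = 0 with
-- number > 0 raises ZeroDivisionError, and base = 1 with number > 0 loops forever.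
def Pre_is_esthetic (number : Int) (base : Int) : Prop :=
  number ≤ 0 ∨ (base ≠ 0 ∧ base ≠ 1)
instance (number : Int) (base : Int) : Decidable (Pre_is_esthetic number base) := by
  unfold Pre_is_esthetic; infer_instance
def pvWitness_is_esthetic : Int × Int := (10, 2)

def Spec_is_esthetic (number : Int) (base : Int) (out : Bool) : Prop := out = is_esthetic_alt number base
instance (number : Int) (base : Int) (out : Bool) : Decidable (Spec_is_esthetic number base out) := by unfold Spec_is_esthetic; infer_instance

-- ===== CLAIM (what is proved, stated in full; the proofs are below) =====
def Claim_equal_is_esthetic : Prop := ∀ (number : Int) (base : Int), Dom_is_esthetic number base → Pre_is_esthetic number base → Spec_is_esthetic number base (is_esthetic number base)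

-- ===== LEMMAS AND PROOFS =====

-- adjacent-pairs check of a digit list, most abstract form
def adjPairs : List Int → Bool
  | [] => true
  | [_] => true
  | a :: b :: r => if (b - a).natAbs ≠ 1 then false else adjPairs (b :: r)

def adjFrom : Option Int → List Int → Bool
  | _, [] => true
  | none, c :: r => adjFrom (some c) r
  | some p, c :: r => if (c - p).natAbs ≠ 1 then false else adjFrom (some c) r

lemma adjFrom_some (p : Int) (l : List Int) : adjFrom (some p) l = adjPairs (p :: l) := by
  induction l generalizing p with
  | nil => simp [adjFrom, adjPairs]
  | cons c r ih => simp [adjFrom, adjPairs, ih]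

lemma adjFrom_none (l : List Int) : adjFrom none l = adjPairs l := by
  cases l with
  | nil => rfl
  | cons c r => simp [adjFrom, adjFrom_some]

lemma altLoop_eq (f : Nat) : ∀ (n b : Int) (prev : Option Int),
    altLoop f n b prev = adjFrom prev (digitsA f n b) := by
  induction f with
  | zero => intro n b prev; simp [altLoop, digitsA, adjFrom]
  | succ f ih =>
    intro n b prev
    by_cases h : n > 0
    · cases prev with
      | none => simp [altLoop, digitsA, h, adjFrom, ih]
      | some p => simp [altLoop, digitsA, h, adjFrom, ih]
    · simp [altLoop, digitsA, h, adjFrom]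

lemma adjPairs_short (l : List Int) (h : l.length ≤ 1) : adjPairs l = true := by
  match l, h with
  | [], _ => rfl
  | [_], _ => rfl

lemma checkFrom_eq (k : Nat) : ∀ (l : List Int) (i : Nat), l.length - i ≤ k → 1 ≤ i →
    checkFrom l i = adjPairs (l.drop (i - 1)) := by
  induction k with
  | zero =>
    intro l i hk hi
    have hlen : l.length ≤ i := by omega
    rw [checkFrom]
    simp only [if_neg (by omega : ¬ i < l.length)]
    exact (adjPairs_short _ (by simp; omega)).symm
  | succ k ih =>
    intro l i hk hi
    rw [checkFrom]
    by_cases h : i < l.length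
    · simp only [if_pos h]
      have h1 : i - 1 < l.length := by omega
      have hd1 : l.drop (i - 1) = l[i - 1] :: l.drop i := by
        have h2 := (List.getElem_cons_drop h1).symm
        rwa [Nat.sub_add_cancel hi] at h2
      have hd2 : l.drop i = l[i] :: l.drop (i + 1) := (List.getElem_cons_drop h).symm
      have hih := ih l (i + 1) (by omega) (by omega)
      have : (i + 1) - 1 = i := by omega
      rw [hih, this, hd1, hd2, adjPairs]
      simp [h, h1]
    · simp only [if_neg h]
      exact (adjPairs_short _ (by simp; omega)).symm

lemma adjPairs_chain (l : List Int) :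
    adjPairs l = true ↔ List.IsChain (fun a b : Int => (b - a).natAbs = 1) l := by
  induction l with
  | nil => simp [adjPairs]
  | cons a r ih =>
    cases r with
    | nil => simp [adjPairs, List.IsChain.singleton]
    | cons b r' =>
      rw [List.isChain_cons_cons, ← ih, adjPairs]
      by_cases h : (b - a).natAbs = 1 <;> simp [h]

lemma adjPairs_reverse (l : List Int) : adjPairs l.reverse = adjPairs l := by
  rw [Bool.eq_iff_iff, adjPairs_chain, adjPairs_chain, List.isChain_reverse]
  constructor
  · exact fun h => h.imp (fun h' => by omega)
  · exact fun h => h.imp (fun h' => by omega)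

theorem is_esthetic_spec : Claim_equal_is_esthetic := by
  intro number base _ _
  unfold Spec_is_esthetic is_esthetic is_esthetic_alt
  rw [altLoop_eq, adjFrom_none, checkFrom_eq ((digitsA (number.toNat + 1) number base).reverse.length) _ 1 (by omega) (by omega)]
  simp [adjPairs_reverse]
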